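-- pv_equiv track=rewrite | github.com/jangarong/CheckYourCalculus | csmath/LogicEquiv/normalForms.py | tautology_contradiction
-- ===== SOURCE A (Python) =====
-- def tautology_contradiction(truth_table: dict) -> str:
--     """
--     ------------------------------------------------------------------
--     normalForms.tautology_contradiction: Determines whether the truth
--     table yields a tautology, contradiction, or neither
--     ------------------------------------------------------------------
--     Parameters:
--         truth_table - Dictionary containing the truth table.
--     Returns:
--         '0' if Contradiction
--         '1' if Tautology
--         '2' if Neither
--     ------------------------------------------------------------------
--     """
--     all0 = True
--     all1 = True
--     for key in truth_table:
--         if truth_table[key] == '0':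
--             all1 = False
--         else:
--             all0 = False
--         if not all0 and not all1:
--             break
--
--     if all0:
--         return '0'
--     elif all1:
--         return '1'
--     return '2'
-- ===== SOURCE B (Python) =====
-- def tautology_contradiction(truth_table: dict) -> str:
--     """Classify a truth table: '0' contradiction, '1' tautology, '2' neither."""
--     n = len(truth_table)
--     zeros = list(truth_table.values()).count('0')
--     return str(int(zeros < n) + int(0 < zeros < n))
-- ===== Notes on version B (the rewrite author's own statement) =====
-- stated objective: alternative
-- what changed: Replaces A's two boolean flags updated in an early-breaking loop with counting the '0' values once and computing the result digit by a closed-form arithmetic index str(int(zeros<n)+int(0<zeros<n)).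
import Mathlib
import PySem

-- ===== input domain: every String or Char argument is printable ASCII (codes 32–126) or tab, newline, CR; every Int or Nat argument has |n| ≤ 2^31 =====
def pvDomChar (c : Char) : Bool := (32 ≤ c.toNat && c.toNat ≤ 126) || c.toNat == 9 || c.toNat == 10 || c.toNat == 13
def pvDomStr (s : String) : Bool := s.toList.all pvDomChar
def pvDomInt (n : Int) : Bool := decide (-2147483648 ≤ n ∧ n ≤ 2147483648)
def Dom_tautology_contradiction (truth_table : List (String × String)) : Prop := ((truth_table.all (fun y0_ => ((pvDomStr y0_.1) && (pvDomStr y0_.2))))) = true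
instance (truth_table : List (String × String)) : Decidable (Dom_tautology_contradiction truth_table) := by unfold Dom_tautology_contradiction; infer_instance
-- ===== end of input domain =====

-- ===== PORT A =====
-- B counts the '0' values once and derives the result digit by an arithmetic
-- formula, instead of A's flag-flipping early-break pass (return value only).
-- 'for key in truth_table' with the lookup 'truth_table[key]' is ported as the walk
-- over the dict's items (each key once, in insertion order, with its value; exact).
def tcLoop : List (String × String) → Bool → Bool → Bool × Bool
  | [], all0, all1 => (all0, all1)
  | p :: ps, all0, all1 =>
    let all1' := if p.2 == "0" then false else all1
    let all0' := if p.2 == "0" then all0 else false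
    if !all0' && !all1' then (all0', all1') else tcLoop ps all0' all1'

def tautology_contradiction (truth_table : List (String × String)) : String :=
  let d := PySem.Dict.ofList truth_table
  let r := tcLoop d.items true true
  if r.1 then "0" else if r.2 then "1" else "2"

-- ===== PORT B =====
def tautology_contradiction_alt (truth_table : List (String × String)) : String :=
  let d := PySem.Dict.ofList truth_table
  let n := d.size
  let zeros := PySem.List.count d.values "0"
  PySem.Int.toStr (((if zeros < n then 1 else 0) : Int) + (if 0 < zeros ∧ zeros < n then 1 else 0))

-- ===== PRECONDITION & SPEC =====
def Spec_tautology_contradiction (truth_table : List (String × String)) (out : String) : Prop := out = tautology_contradiction_alt truth_table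
instance (truth_table : List (String × String)) (out : String) : Decidable (Spec_tautology_contradiction truth_table out) := by unfold Spec_tautology_contradiction; infer_instance

-- ===== CLAIM (what is proved, stated in full; the proofs are below) =====
def Claim_equal_tautology_contradiction : Prop := ∀ (truth_table : List (String × String)), Dom_tautology_contradiction truth_table → Spec_tautology_contradiction truth_table (tautology_contradiction truth_table)

-- ===== LEMMAS AND PROOFS =====
theorem tcLoop_char (l : List (String × String)) (a0 a1 : Bool) :
    tcLoop l a0 a1 = (a0 && l.all (fun p => p.2 == "0"),
                      a1 && l.all (fun p => !(p.2 == "0"))) := by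
  induction l generalizing a0 a1 with
  | nil => simp [tcLoop]
  | cons p ps ih =>
    cases h : (p.2 == "0") <;>
      simp only [tcLoop, h, List.all_cons, if_true, Bool.not_false, Bool.not_true] <;>
      cases a0 <;> cases a1 <;> simp [ih]

theorem pv_classify (tt : List (String × String)) :
    tautology_contradiction tt = tautology_contradiction_alt tt := by
  simp only [tautology_contradiction, tautology_contradiction_alt, tcLoop_char,
    PySem.List.count_eq, Bool.true_and]
  set l := (PySem.Dict.ofList tt).items with hl
  have hvals : (PySem.Dict.ofList tt).values = l.map (fun p => p.2) := rfl
  have hsize : (PySem.Dict.ofList tt).size = l.length := rfl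
  rw [hvals, hsize]
  set vs := l.map (fun p => p.2) with hvs
  have hlen : l.length = vs.length := by simp [hvs]
  rw [hlen]
  have hall0 : (l.all (fun p => p.2 == "0")) = (vs.count "0" == vs.length) := by
    rw [Bool.eq_iff_iff, List.all_eq_true, beq_iff_eq, List.count_eq_length]
    constructor
    · intro h b hb
      rw [hvs] at hb
      rcases List.mem_map.1 hb with ⟨p, hp, rfl⟩
      exact (beq_iff_eq.1 (h p hp)).symm
    · intro h p hp
      rw [beq_iff_eq]
      exact (h p.2 (by rw [hvs]; exact List.mem_map.2 ⟨p, hp, rfl⟩)).symm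
  have hall1 : (l.all (fun p => !(p.2 == "0"))) = (vs.count "0" == 0) := by
    rw [Bool.eq_iff_iff, List.all_eq_true, beq_iff_eq, List.count_eq_zero]
    constructor
    · intro h hm
      rw [hvs] at hm
      rcases List.mem_map.1 hm with ⟨p, hp, hpe⟩
      have := h p hp
      simp [hpe] at this
    · intro h p hp
      simp only [Bool.not_eq_true', beq_eq_false_iff_ne, ne_eq]
      exact fun hc => h (by rw [hvs]; exact List.mem_map.2 ⟨p, hp, hc⟩)
  rw [hall0, hall1]
  rcases Nat.lt_or_ge (vs.count "0") vs.length with hlt | hge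
  · have h0 : (vs.count "0" == vs.length) = false := by simp [Nat.ne_of_lt hlt]
    rcases Nat.eq_zero_or_pos (vs.count "0") with hz | hpos
    · have hpos' : 0 < vs.length := hz ▸ hlt
      simp only [h0, Bool.false_eq_true, if_false]
      simp only [hz, BEq.rfl, if_true]
      rw [if_pos hpos', if_neg (by omega : ¬(0 < 0 ∧ 0 < vs.length))]
      rfl
    · have h1 : (vs.count "0" == 0) = false := by simp [Nat.ne_of_gt hpos]
      simp only [h0, h1, Bool.false_eq_true, if_false]
      rw [if_pos hlt, if_pos (And.intro hpos hlt)]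
      rfl
  · have heq : vs.count "0" = vs.length := Nat.le_antisymm (List.count_le_length) hge
    simp only [heq, BEq.rfl, if_true]
    rw [if_neg (Nat.lt_irrefl _), if_neg (fun h => Nat.lt_irrefl _ h.2)]
    rfl

-- ===== VERDICT (by name: the statement is the Claim_ definition above) =====
theorem tautology_contradiction_spec : Claim_equal_tautology_contradiction := by
  intro tt _
  unfold Spec_tautology_contradiction
  exact pv_classify tt
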